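-- pv_equiv track=rewrite | github.com/PitrPi/PlantsVsZombies-text | main.py | _get_shooter_pos
-- ===== SOURCE A (Python) =====
-- def _get_shooter_pos(lawn_dict):
--     """
--     Find all S shooters and order them right to left, top to bottom.
--     We will iterate over them in this order
--     """
--     if not isinstance(lawn_dict, dict):
--         return []
--     shooter_list = []
--     for row_idx, row in lawn_dict.items():
--         for col_idx, col in enumerate(row):
--             if col == 'S':
--                 shooter_list.append([row_idx, col_idx])
--     return sorted(shooter_list, key=lambda l: (-l[1], l[0]))
-- ===== SOURCE B (Python) =====
-- def _get_shooter_pos(lawn_dict):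
--     """
--     Find all S shooters and order them right to left, top to bottom.
--     We will iterate over them in this order
--     """
--     if not isinstance(lawn_dict, dict):
--         return []
--     rows = sorted(lawn_dict.items(), key=lambda kv: kv[0])
--     width = 0
--     for _, row in rows:
--         width = max(width, len(row))
--     out = []
--     for col in range(width - 1, -1, -1):
--         for row_idx, row in rows:
--             if col < len(row) and row[col] == 'S':
--                 out.append([row_idx, col])
--     return out
-- ===== Notes on version B (the rewrite author's own statement) =====
-- stated objective: alternative
-- what changed: A collects all shooter cells in dict order and then sorts them by (-col, row); B never sorts: it walks columns right-to-left and, inside, the rows in ascending key order, emitting positions already in the required order.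
import Mathlib
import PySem

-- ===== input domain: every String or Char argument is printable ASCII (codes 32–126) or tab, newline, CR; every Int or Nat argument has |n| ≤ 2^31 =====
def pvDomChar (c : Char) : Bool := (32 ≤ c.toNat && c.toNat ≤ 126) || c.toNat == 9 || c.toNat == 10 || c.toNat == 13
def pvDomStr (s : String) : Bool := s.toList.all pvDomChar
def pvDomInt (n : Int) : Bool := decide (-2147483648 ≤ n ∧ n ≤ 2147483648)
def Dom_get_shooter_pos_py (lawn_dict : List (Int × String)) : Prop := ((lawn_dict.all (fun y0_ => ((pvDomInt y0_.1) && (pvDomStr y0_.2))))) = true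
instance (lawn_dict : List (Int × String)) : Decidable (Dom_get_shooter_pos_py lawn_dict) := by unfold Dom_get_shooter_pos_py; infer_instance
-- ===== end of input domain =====

-- B replaces A's collect-then-sort (gather all 'S' cells, then sorted(key=(-col,row))) by direct
-- in-order emission: columns right-to-left, rows in ascending key order — no final sort (objective: alternative).
-- The dict argument is the association list; both ports read it through PySem.Dict.ofList (= dict(pairs)).

-- ===== PORT A =====
def get_shooter_pos_py (lawn_dict : List (Int × String)) : List (List Int) :=
  -- for row_idx, row in lawn_dict.items(): for col_idx, col in enumerate(row): if col == 'S': append [row_idx, col_idx]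
  let shooter_list : List (List Int) :=
    ((PySem.Dict.ofList lawn_dict).items).foldl (fun acc rr =>
      (PySem.List.enumerate rr.2.toList).foldl (fun acc2 cc =>
        if cc.2 = 'S' then acc2 ++ [[rr.1, cc.1]] else acc2) acc) []
  -- sorted(shooter_list, key=lambda l: (-l[1], l[0])); every element has length 2, so the getD default is never used
  PySem.List.sorted2 shooter_list (fun l => -(PySem.List.pyGetD l 1 0)) (fun l => PySem.List.pyGetD l 0 0) false

-- ===== PORT B =====
def get_shooter_pos_py_alt (lawn_dict : List (Int × String)) : List (List Int) :=
  -- rows = sorted(lawn_dict.items(), key=lambda kv: kv[0])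
  let rows := PySem.List.sorted ((PySem.Dict.ofList lawn_dict).items) (fun kv => kv.1) false
  -- width = running max of len(row)
  let width : Int := rows.foldl (fun w kv => max w (PySem.Str.len kv.2)) 0
  -- for col in range(width-1, -1, -1): for row_idx, row in rows: if col < len(row) and row[col] == 'S': append [row_idx, col]
  (PySem.List.pyRange (width - 1) (-1) (-1)).foldl (fun acc col =>
    rows.foldl (fun acc2 kv =>
      if col < PySem.Str.len kv.2 ∧ PySem.List.pyGet? kv.2.toList col = some 'S'
      then acc2 ++ [[kv.1, col]] else acc2) acc) []

-- ===== PRECONDITION & SPEC =====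
def Spec_get_shooter_pos_py (lawn_dict : List (Int × String)) (out : List (List Int)) : Prop := out = get_shooter_pos_py_alt lawn_dict
instance (lawn_dict : List (Int × String)) (out : List (List Int)) : Decidable (Spec_get_shooter_pos_py lawn_dict out) := by unfold Spec_get_shooter_pos_py; infer_instance

-- ===== CLAIM (what is proved, stated in full; the proofs are below) =====
def Claim_equal_get_shooter_pos_py : Prop := ∀ (lawn_dict : List (Int × String)), Dom_get_shooter_pos_py lawn_dict → Spec_get_shooter_pos_py lawn_dict (get_shooter_pos_py lawn_dict)

-- ===== LEMMAS AND PROOFS =====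

-- abbreviations for the proof (not used by the ports)
def pvKey (l : List Int) : Lex (Int × Int) := toLex (-(PySem.List.pyGetD l 1 0), PySem.List.pyGetD l 0 0)

def pvShoot (L : List (Int × String)) : List (List Int) :=
  ((PySem.Dict.ofList L).items).flatMap (fun rr =>
    (PySem.List.enumerate rr.2.toList).flatMap (fun cc =>
      if cc.2 = 'S' then [[rr.1, cc.1]] else []))

def pvRows (L : List (Int × String)) : List (Int × String) :=
  PySem.List.sorted ((PySem.Dict.ofList L).items) (fun kv => kv.1) false

def pvW (L : List (Int × String)) : Int :=
  (pvRows L).foldl (fun w kv => max w (PySem.Str.len kv.2)) 0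

def pvCanon (L : List (Int × String)) : List (List Int) :=
  (PySem.List.pyRange (pvW L - 1) (-1) (-1)).flatMap (fun col =>
    (pvRows L).flatMap (fun kv =>
      if col < PySem.Str.len kv.2 ∧ PySem.List.pyGet? kv.2.toList col = some 'S'
      then [[kv.1, col]] else []))

lemma pv_foldl_ite {α β : Type} (p : α → Prop) [DecidablePred p] (f : α → β) (l : List α) (acc : List β) :
    l.foldl (fun a x => if p x then a ++ [f x] else a) acc
      = acc ++ l.flatMap (fun x => if p x then [f x] else []) := by
  induction l generalizing acc with
  | nil => simp
  | cons y t ih => by_cases h : p y <;> simp [h, ih]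

lemma pv_flatMap_congr {α β : Type} {l : List α} {f g : α → List β}
    (h : ∀ a ∈ l, f a = g a) : l.flatMap f = l.flatMap g := by
  induction l with
  | nil => rfl
  | cons y t ih =>
      simp only [List.flatMap_cons, h y (by simp)]
      rw [ih (fun a ha => h a (by simp [ha]))]

lemma pv_flatMap_comm_perm {α β γ : Type} (xs : List α) (ys : List β) (f : α → β → List γ) :
    (xs.flatMap fun a => ys.flatMap fun b => f a b).Perm
      (ys.flatMap fun b => xs.flatMap fun a => f a b) := by
  rw [← Multiset.coe_eq_coe]
  simp only [← Multiset.coe_bind]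
  exact Multiset.bind_bind (xs : Multiset α) (ys : Multiset β)

lemma pv_pairwise_flatMap {α β : Type} {R : β → β → Prop} {l : List α} {f : α → List β}
    (h1 : ∀ a ∈ l, (f a).Pairwise R)
    (h2 : l.Pairwise (fun a c => ∀ x ∈ f a, ∀ y ∈ f c, R x y)) :
    (l.flatMap f).Pairwise R := by
  induction l with
  | nil => simp
  | cons a t ih =>
      rcases List.pairwise_cons.mp h2 with ⟨hhead, htail⟩
      simp only [List.flatMap_cons]
      rw [List.pairwise_append]
      refine ⟨h1 a (by simp), ih (fun b hb => h1 b (by simp [hb])) htail, ?_⟩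
      intro x hx y hy
      rcases List.mem_flatMap.mp hy with ⟨c, hc, hyc⟩
      exact hhead c hc x hx y hyc

lemma pv_mem_ite_singleton {α : Type} {p : Prop} [Decidable p] {x v : α}
    (h : x ∈ (if p then [v] else [])) : x = v := by
  split at h <;> simp_all

lemma pvKey_pair (r c : Int) : pvKey [r, c] = toLex (-c, r) := rfl

lemma pv_sorted2_eq_sorted_lex {α : Type} (xs : List α) (k1 k2 : α → Int) :
    PySem.List.sorted2 xs k1 k2 false
      = PySem.List.sorted xs (fun a => toLex (k1 a, k2 a)) false := by
  have hbf : (fun a b : α => decide (k1 a < k1 b) || (!decide (k1 b < k1 a) && decide (k2 a < k2 b)))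
      = (fun a b : α => decide (toLex (k1 a, k2 a) < toLex (k1 b, k2 b))) := by
    funext a b
    by_cases h1 : k1 a < k1 b <;> by_cases h2 : k1 b < k1 a <;>
      simp [h1, h2, Prod.Lex.lt_iff] <;> omega
  unfold PySem.List.sorted2 PySem.List.sorted
  apply PySem.List.foldl_congr_mem
  intro acc x _
  exact congrArg (fun b => PySem.List.insertBy b x acc) hbf

lemma pvA_eq (L : List (Int × String)) :
    get_shooter_pos_py L = PySem.List.sorted (pvShoot L) pvKey false := by
  simp only [get_shooter_pos_py]
  have h1 : ∀ (acc : List (List Int)) (rr : Int × String),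
      (PySem.List.enumerate rr.2.toList).foldl
        (fun acc2 cc => if cc.2 = 'S' then acc2 ++ [[rr.1, cc.1]] else acc2) acc
        = acc ++ (PySem.List.enumerate rr.2.toList).flatMap
            (fun cc => if cc.2 = 'S' then [[rr.1, cc.1]] else []) :=
    fun acc rr => pv_foldl_ite (fun cc : Int × Char => cc.2 = 'S') (fun cc : Int × Char => [rr.1, cc.1]) _ acc
  have h2 : ((PySem.Dict.ofList L).items).foldl (fun acc rr =>
      (PySem.List.enumerate rr.2.toList).foldl
        (fun acc2 cc => if cc.2 = 'S' then acc2 ++ [[rr.1, cc.1]] else acc2) acc) []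
      = pvShoot L := by
    rw [PySem.List.foldl_congr_mem ((PySem.Dict.ofList L).items) _
          (fun acc rr => acc ++ (PySem.List.enumerate rr.2.toList).flatMap
            (fun cc => if cc.2 = 'S' then [[rr.1, cc.1]] else [])) []
          (fun acc rr _ => h1 acc rr),
        PySem.List.foldl_append_eq_flatMap]
    simp [pvShoot]
  rw [h2, pv_sorted2_eq_sorted_lex]
  rfl

lemma pvB_eq (L : List (Int × String)) :
    get_shooter_pos_py_alt L = pvCanon L := by
  show (PySem.List.pyRange (pvW L - 1) (-1) (-1)).foldl (fun acc col =>
    (pvRows L).foldl (fun acc2 kv =>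
      if col < PySem.Str.len kv.2 ∧ PySem.List.pyGet? kv.2.toList col = some 'S'
      then acc2 ++ [[kv.1, col]] else acc2) acc) [] = pvCanon L
  have h1 : ∀ (acc : List (List Int)) (col : Int),
      (pvRows L).foldl (fun acc2 kv =>
        if col < PySem.Str.len kv.2 ∧ PySem.List.pyGet? kv.2.toList col = some 'S'
        then acc2 ++ [[kv.1, col]] else acc2) acc
        = acc ++ (pvRows L).flatMap (fun kv =>
            if col < PySem.Str.len kv.2 ∧ PySem.List.pyGet? kv.2.toList col = some 'S'
            then [[kv.1, col]] else []) :=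
    fun acc col => pv_foldl_ite (fun kv : Int × String => col < PySem.Str.len kv.2 ∧ PySem.List.pyGet? kv.2.toList col = some 'S') (fun kv : Int × String => [kv.1, col]) _ acc
  rw [PySem.List.foldl_congr_mem (PySem.List.pyRange (pvW L - 1) (-1) (-1)) _
        (fun acc col => acc ++ (pvRows L).flatMap (fun kv =>
          if col < PySem.Str.len kv.2 ∧ PySem.List.pyGet? kv.2.toList col = some 'S'
          then [[kv.1, col]] else [])) []
        (fun acc col _ => h1 acc col),
      PySem.List.foldl_append_eq_flatMap]
  simp [pvCanon]

lemma pvRows_strict (L : List (Int × String)) :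
    (pvRows L).Pairwise (fun a b => a.1 < b.1) := by
  have hle : (pvRows L).Pairwise (fun a b => a.1 ≤ b.1) :=
    PySem.List.sorted_pairwise ((PySem.Dict.ofList L).items) (fun kv => kv.1)
  have hkeys : (((PySem.Dict.ofList L).items).map (fun kv => kv.1)).Nodup := by
    have := PySem.Dict.nodup_keys_ofList (κ := Int) (ν := String) L
    simpa [PySem.Dict.keys] using this
  have hperm : ((pvRows L).map (fun kv => kv.1)).Perm
      (((PySem.Dict.ofList L).items).map (fun kv => kv.1)) :=
    (PySem.List.sorted_perm _ _ _).map _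
  have hnd : ((pvRows L).map (fun kv => kv.1)).Nodup := hperm.nodup_iff.mpr hkeys
  have hne : (pvRows L).Pairwise (fun a b => a.1 ≠ b.1) := List.pairwise_map.mp hnd
  exact (hle.and hne).imp (fun h => lt_of_le_of_ne h.1 h.2)

lemma pvPerm (L : List (Int × String)) : (pvCanon L).Perm (pvShoot L) := by
  unfold pvCanon pvShoot
  refine (pv_flatMap_comm_perm _ _ _).trans ?_
  refine List.Perm.flatMap (PySem.List.sorted_perm _ _ _) ?_
  intro kv hkv
  have hlen : PySem.Str.len kv.2 ≤ pvW L :=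
    (PySem.List.le_foldl_max_int (pvRows L) (fun kv => PySem.Str.len kv.2) 0).2 kv hkv
  have h0 : (0:Int) ≤ PySem.Str.len kv.2 := by
    simp [PySem.Str.len]
  have hc : PySem.List.pyRange (pvW L - 1) (-1) (-1) = (PySem.List.pyRange 0 (pvW L)).reverse := by
    have h := PySem.List.pyRange_neg_one_eq_reverse (pvW L - 1) (-1)
    simpa using h
  rw [hc]
  refine (List.Perm.flatMap (List.reverse_perm _) (fun a _ => List.Perm.refl _)).trans ?_
  have hsplit : PySem.List.pyRange 0 (pvW L)
      = PySem.List.pyRange 0 (PySem.Str.len kv.2) ++ PySem.List.pyRange (PySem.Str.len kv.2) (pvW L) :=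
    PySem.List.pyRange_one_append 0 _ _ h0 hlen
  rw [hsplit, List.flatMap_append]
  have hnil : (PySem.List.pyRange (PySem.Str.len kv.2) (pvW L)).flatMap (fun col =>
      if col < PySem.Str.len kv.2 ∧ PySem.List.pyGet? kv.2.toList col = some 'S'
      then [[kv.1, col]] else []) = [] := by
    apply List.flatMap_eq_nil_iff.mpr
    intro col hcol
    have hm := PySem.List.mem_pyRange_one.mp hcol
    rw [if_neg]
    intro hcontra
    exact absurd hcontra.1 (not_lt.mpr hm.1)
  rw [hnil, List.append_nil]
  have heq : (PySem.List.pyRange 0 (PySem.Str.len kv.2)).flatMap (fun col =>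
        if col < PySem.Str.len kv.2 ∧ PySem.List.pyGet? kv.2.toList col = some 'S'
        then [[kv.1, col]] else [])
      = (PySem.List.enumerate kv.2.toList).flatMap
          (fun cc => if cc.2 = 'S' then [[kv.1, cc.1]] else []) := by
    have hlen_eq : PySem.List.len kv.2.toList = PySem.Str.len kv.2 := by
      simp [PySem.Str.len, PySem.List.len]
    rw [PySem.List.enumerate_eq_map_pyRange kv.2.toList ' ', List.flatMap_map, hlen_eq]
    apply pv_flatMap_congr
    intro col hcol
    have hm := PySem.List.mem_pyRange_one.mp hcol
    obtain ⟨n, rfl⟩ : ∃ n : Nat, col = (n : Int) := ⟨col.toNat, (Int.toNat_of_nonneg hm.1).symm⟩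
    have hn : n < kv.2.toList.length := by
      have h2 := hm.2
      rw [← hlen_eq] at h2
      simp only [PySem.List.len] at h2
      omega
    have hget : PySem.List.pyGet? kv.2.toList (n : Int) = some kv.2.toList[n] := by
      rw [PySem.List.pyGet?_natCast]
      exact List.getElem?_eq_getElem hn
    have hgetD : PySem.List.pyGetD kv.2.toList (n : Int) ' ' = kv.2.toList[n] := by
      rw [PySem.List.pyGetD_natCast]
      exact List.getD_eq_getElem _ _ hn
    have hlt : (n : Int) < PySem.Str.len kv.2 := by
      rw [← hlen_eq]
      simp only [PySem.List.len]
      omega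
    simp only [hget, hgetD]
    by_cases hS : kv.2.toList[n] = 'S'
    · rw [if_pos ⟨hlt, by rw [hS]⟩, if_pos hS]
    · rw [if_neg (fun h => hS (Option.some.inj h.2)), if_neg hS]
  rw [heq]

lemma pvPairwise (L : List (Int × String)) :
    (pvCanon L).Pairwise (fun a b => pvKey a < pvKey b) := by
  unfold pvCanon
  apply pv_pairwise_flatMap
  · intro col _
    apply pv_pairwise_flatMap
    · intro kv _
      split <;> simp
    · refine (pvRows_strict L).imp (fun {a b} hab => ?_)
      intro x hx y hy
      rw [pv_mem_ite_singleton hx, pv_mem_ite_singleton hy, pvKey_pair, pvKey_pair]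
      simp only [Prod.Lex.lt_iff, ofLex_toLex]
      exact Or.inr ⟨trivial, hab⟩
  · have hrev : (PySem.List.pyRange (pvW L - 1) (-1) (-1)).Pairwise (fun c d => d < c) := by
      have hc : PySem.List.pyRange (pvW L - 1) (-1) (-1) = (PySem.List.pyRange 0 (pvW L)).reverse := by
        have h := PySem.List.pyRange_neg_one_eq_reverse (pvW L - 1) (-1)
        simpa using h
      rw [hc, List.pairwise_reverse]
      exact PySem.List.pairwise_lt_pyRange_one 0 (pvW L)
    refine hrev.imp (fun {c d} hdc => ?_)
    intro x hx y hy
    obtain ⟨kv, _, hxk⟩ := List.mem_flatMap.mp hx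
    obtain ⟨kv', _, hyk⟩ := List.mem_flatMap.mp hy
    rw [pv_mem_ite_singleton hxk, pv_mem_ite_singleton hyk, pvKey_pair, pvKey_pair]
    simp only [Prod.Lex.lt_iff, ofLex_toLex]
    omega

-- ===== VERDICT (by name: the statement is the Claim_ definition above) =====
theorem get_shooter_pos_py_spec : Claim_equal_get_shooter_pos_py := by
  intro L _
  show get_shooter_pos_py L = get_shooter_pos_py_alt L
  rw [pvA_eq, pvB_eq]
  exact PySem.List.sorted_eq_of_perm_of_pairwise_lt _ _ _ (pvPerm L) (pvPairwise L)
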